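-- pv_equiv track=rewrite | github.com/gesellkammer/maelzel | maelzel/core/common.py | carryColumns
-- ===== SOURCE A (Python) =====
-- def carryColumns(rows: list, sentinel=None) -> list:
--     """
--     Converts a series of rows with possibly unequal number of elements per row
--     so that all rows have the same length, filling each new row with elements
--     from the previous, if they do not have enough elements (elements are "carried"
--     to the next row)
--     """
--     maxlen = max(len(row) for row in rows)
--     initrow = [0] * maxlen
--     outrows = [initrow]
--     for row in rows:
--         lenrow = len(row)
--         if lenrow < maxlen:
--             row = row + outrows[-1][lenrow:]
--         if sentinel in row:
--             row = row.__class__(x if x is not sentinel else lastx for x, lastx in zip(row, outrows[-1]))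
--         outrows.append(row)
--     # we need to discard the initial row
--     return outrows[1:]
-- ===== SOURCE B (Python) =====
-- def carryColumns(rows: list, sentinel=None) -> list:
--     """Column-major: forward-fill each column independently (keep the last
--     non-sentinel value seen going down the column, starting from 0), then
--     transpose the columns back into rows."""
--     maxlen = max(len(row) for row in rows)
--     cols = []
--     for j in range(maxlen):
--         cur = 0
--         col = []
--         for row in rows:
--             if j < len(row) and row[j] is not sentinel:
--                 cur = row[j]
--             col.append(cur)
--         cols.append(col)
--     return [[col[i] for col in cols] for i in range(len(rows))]
-- ===== Notes on version B (the rewrite author's own statement) =====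
-- stated objective: alternative
-- what changed: B traverses the data column-major: it forward-fills each column independently (last non-sentinel value seen going down, starting from 0) and then transposes, instead of A's row-by-row pass that concatenates the previous output row's tail slice and conditionally rewrites sentinel cells via zip; Pre_ excludes empty rows (A raises ValueError) and inputs whose int sentinel lies outside CPython's small-int cache yet occurs in a row, where A's and B's 'is' tests depend on object identity the Int model cannot express.
-- outside the precondition, e.g. on carryColumns([], None): A raises ValueError, B raises ValueError; on carryColumns([[1000, 2]], 1000): A returns [[1000, 2]], B returns [[1000, 2]]
import Mathlib
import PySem

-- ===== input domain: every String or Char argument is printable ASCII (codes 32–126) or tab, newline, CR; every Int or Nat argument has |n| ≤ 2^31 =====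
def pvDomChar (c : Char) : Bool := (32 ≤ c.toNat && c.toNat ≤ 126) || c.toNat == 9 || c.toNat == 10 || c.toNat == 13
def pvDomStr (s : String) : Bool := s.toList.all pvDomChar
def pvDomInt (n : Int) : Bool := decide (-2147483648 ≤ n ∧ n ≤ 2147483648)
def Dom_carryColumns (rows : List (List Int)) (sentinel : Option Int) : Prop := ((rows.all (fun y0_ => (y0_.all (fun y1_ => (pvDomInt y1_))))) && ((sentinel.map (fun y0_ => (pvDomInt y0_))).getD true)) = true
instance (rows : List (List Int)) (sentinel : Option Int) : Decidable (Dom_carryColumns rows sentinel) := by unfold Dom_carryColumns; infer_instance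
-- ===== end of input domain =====

-- B traverses column-major: it forward-fills each column independently and then transposes,
-- instead of A's row-by-row pass with tail-slice concatenation and zip rewrite (objective: alternative).


-- ===== PORT A =====
-- loop body of A: one iteration, given outrows so far and the current row.
-- outrows[-1] is ported as getLastD [] (outrows is never empty: it starts as [initrow]);
-- row[lenrow:] with 0 ≤ lenrow is List.drop lenrow (exact here);
-- `sentinel in row` is False for sentinel=None over int rows, else membership;
-- `x is not sentinel` is ported as value inequality (identity coincides with equality inside Pre_).
def pvAStep (maxlen : Nat) (sentinel : Option Int) (outrows : List (List Int)) (row : List Int) : List (List Int) :=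
  let lenrow := row.length
  let row := if lenrow < maxlen then row ++ (outrows.getLastD []).drop lenrow else row
  let row := if (match sentinel with | none => false | some s => row.contains s) then
      (row.zip (outrows.getLastD [])).map (fun p => if some p.1 ≠ sentinel then p.1 else p.2)
    else row
  outrows ++ [row]

def carryColumns (rows : List (List Int)) (sentinel : Option Int) : List (List Int) :=
  -- max(len(row) for row in rows); Pre_ excludes rows = [] (Python raises ValueError there)
  let maxlen : Nat := (rows.map List.length).foldl Nat.max 0
  let initrow : List Int := List.replicate maxlen 0
  let outrows := rows.foldl (pvAStep maxlen sentinel) [initrow]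
  outrows.drop 1   -- outrows[1:]

-- ===== PORT B =====
-- cell rule of Source B's inner loop: `if j < len(row) and row[j] is not sentinel: cur = row[j]`,
-- ported via row[j]? and value inequality (identity coincides with equality inside Pre_).
def colStep (sentinel : Option Int) (j : Nat) (cur : Int) (row : List Int) : Int :=
  match row[j]? with
  | some x => if some x ≠ sentinel then x else cur
  | none => cur

-- one column of B: forward-fill down the rows, collecting every intermediate value
def pvCol (sentinel : Option Int) (rows : List (List Int)) (j : Nat) : List Int :=
  (rows.foldl (fun st row =>
      let cur := colStep sentinel j st.1 row
      (cur, st.2 ++ [cur])) ((0 : Int), ([] : List Int))).2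

def carryColumns_alt (rows : List (List Int)) (sentinel : Option Int) : List (List Int) :=
  let maxlen : Nat := (rows.map List.length).foldl Nat.max 0
  let cols := (List.range maxlen).map (fun j => pvCol sentinel rows j)
  -- col[i]: each col has length rows.length and i < rows.length, so getD i 0 is exact
  (List.range rows.length).map (fun i => cols.map (fun col => col.getD i 0))

-- ===== PRECONDITION & SPEC =====
-- Pre_ excludes rows = [], where Python A raises ValueError (max() of an empty sequence), and inputs
-- whose int sentinel lies outside CPython's small-int cache [-5, 256] yet occurs in a row: there A's
-- (and B's) `is` test depends on object identity, which the Int model cannot express.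
def Pre_carryColumns (rows : List (List Int)) (sentinel : Option Int) : Prop :=
  rows ≠ [] ∧
    (sentinel.map (fun s => decide (-5 ≤ s ∧ s ≤ 256) || rows.all (fun r => decide (s ∉ r)))).getD true = true
instance (rows : List (List Int)) (sentinel : Option Int) : Decidable (Pre_carryColumns rows sentinel) := by unfold Pre_carryColumns; infer_instance
def pvWitness_carryColumns : List (List Int) × Option Int := ([[1], [2, 3], [0]], some 0)

def Spec_carryColumns (rows : List (List Int)) (sentinel : Option Int) (out : List (List Int)) : Prop := out = carryColumns_alt rows sentinel
instance (rows : List (List Int)) (sentinel : Option Int) (out : List (List Int)) : Decidable (Spec_carryColumns rows sentinel out) := by unfold Spec_carryColumns; infer_instance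

-- ===== CLAIM (what is proved, stated in full; the proofs are below) =====
def Claim_equal_carryColumns : Prop := ∀ (rows : List (List Int)) (sentinel : Option Int), Dom_carryColumns rows sentinel → Pre_carryColumns rows sentinel → Spec_carryColumns rows sentinel (carryColumns rows sentinel)

-- ===== LEMMAS AND PROOFS =====

-- the common pointwise specification: cell (i, j) = forward-fill of column j through rows 0..i
def pvCell (s : Option Int) (rs : List (List Int)) (j i : Nat) : Int :=
  (rs.take (i + 1)).foldl (colStep s j) 0

def pvSpecOut (s : Option Int) (rs : List (List Int)) (m : Nat) : List (List Int) :=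
  (List.range rs.length).map (fun i => (List.range m).map (fun j => pvCell s rs j i))

-- row-major reformulation of A (proof-only helper)
def pvBRow (m : Nat) (s : Option Int) (prev row : List Int) : List Int :=
  (List.range m).map (fun j => colStep s j (prev.getD j 0) row)

def pvBStep (m : Nat) (s : Option Int) (st : List Int × List (List Int)) (row : List Int) : List Int × List (List Int) :=
  let prev := pvBRow m s st.1 row
  (prev, st.2 ++ [prev])

theorem pvBRow_length (m : Nat) (s : Option Int) (prev row : List Int) :
    (pvBRow m s prev row).length = m := by
  simp [pvBRow]

theorem pv_getD_map_range (m j : Nat) (g : Nat → Int) (hj : j < m) :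
    (((List.range m).map g).getD j 0) = g j := by
  simp [List.getD_eq_getElem?_getD, hj]

theorem pv_le_foldl_max (l : List Nat) (a : Nat) : a ≤ l.foldl Nat.max a := by
  induction l generalizing a with
  | nil => simp
  | cons x xs ih => exact le_trans (Nat.le_max_left a x) (ih _)

theorem pv_mem_le_foldl_max (l : List Nat) (a x : Nat) (hx : x ∈ l) : x ≤ l.foldl Nat.max a := by
  induction l generalizing a with
  | nil => cases hx
  | cons y ys ih =>
    rcases List.mem_cons.1 hx with h | h
    · subst h; exact le_trans (Nat.le_max_right a x) (pv_le_foldl_max _ _)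
    · exact ih _ h

-- A's row for one step, factored out for reasoning
def pvARow (m : Nat) (s : Option Int) (prev row : List Int) : List Int :=
  let row1 := if row.length < m then row ++ prev.drop row.length else row
  if (match s with | none => false | some k => row1.contains k) then
    (row1.zip prev).map (fun p => if some p.1 ≠ s then p.1 else p.2)
  else row1

theorem pvAStep_eq (m : Nat) (s : Option Int) (outrows : List (List Int)) (row : List Int) :
    pvAStep m s outrows row = outrows ++ [pvARow m s (outrows.getLastD []) row] := by
  simp [pvAStep, pvARow]

theorem pvRow1_len (m : Nat) (prev row : List Int) (hprev : prev.length = m) (hrow : row.length ≤ m) :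
    (if row.length < m then row ++ prev.drop row.length else row).length = m := by
  split
  · simp [hprev]; omega
  · omega

theorem pvRow1_get (m : Nat) (prev row : List Int) (hprev : prev.length = m) (hrow : row.length ≤ m)
    (j : Nat) (hj : j < m) :
    (if row.length < m then row ++ prev.drop row.length else row)[j]'(by rw [pvRow1_len m prev row hprev hrow]; omega) =
      if h : j < row.length then row[j] else prev.getD j 0 := by
  have hpj : j < prev.length := by omega
  split
  · by_cases h : j < row.length
    · simp [h]
    · have hidx : row.length + (j - row.length) = j := by omega
      simp only [dif_neg h, List.getD_eq_getElem?_getD, List.getElem?_eq_getElem hpj,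
                 Option.getD_some]
      rw [List.getElem_append_right (by omega)]
      simp [hidx]
  · next hge =>
      have h : j < row.length := by omega
      simp [h]

theorem pvARow_eq_bRow (m : Nat) (s : Option Int) (prev row : List Int)
    (hprev : prev.length = m) (hrow : row.length ≤ m) :
    pvARow m s prev row = pvBRow m s prev row := by
  have hlen1 := pvRow1_len m prev row hprev hrow
  have hget1 := pvRow1_get m prev row hprev hrow
  cases s with
  | none =>
    unfold pvARow pvBRow
    simp only [if_neg (by simp : ¬(false = true))]
    apply List.ext_getElem
    · simp only [List.length_map, List.length_range]; exact hlen1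
    · intro j hj hj'
      have hjm : j < m := by simpa using hj'
      rw [hget1 j hjm]
      simp only [List.getElem_map, List.getElem_range]
      by_cases h : j < row.length
      · simp [colStep, h]
      · have hn : row[j]? = none := by simp; omega
        simp [colStep, h]
  | some k =>
    unfold pvARow pvBRow
    by_cases hguard : (if row.length < m then row ++ prev.drop row.length else row).contains k
    · simp only [if_pos hguard]
      apply List.ext_getElem
      · simp [hlen1, hprev]
      · intro j hj hj'
        have hjm : j < m := by simpa using hj'
        have hpj : j < prev.length := by omega
        rw [List.getElem_map, List.getElem_zip]
        simp only [List.getElem_map, List.getElem_range]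
        have h1 := hget1 j hjm
        by_cases h : j < row.length
        · simp only [dif_pos h] at h1
          simp [h1, colStep, List.getElem?_eq_getElem h, List.getD_eq_getElem?_getD,
                List.getElem?_eq_getElem hpj]
        · simp only [dif_neg h] at h1
          have hn : row[j]? = none := by simp; omega
          simp only [h1, colStep, hn, List.getD_eq_getElem?_getD, List.getElem?_eq_getElem hpj]
          split <;> rfl
    · simp only [if_neg hguard]
      have hne : ∀ x ∈ (if row.length < m then row ++ prev.drop row.length else row), x ≠ k := by
        intro x hx hc
        exact hguard (by simp only [List.contains_iff_mem]; exact hc ▸ hx)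
      apply List.ext_getElem
      · simp [hlen1]
      · intro j hj hj'
        have hjm : j < m := by simpa using hj'
        have hmem := List.getElem_mem hj
        have hx := hne _ hmem
        rw [hget1 j hjm] at hx ⊢
        simp only [List.getElem_map, List.getElem_range]
        by_cases h : j < row.length
        · simp only [dif_pos h] at hx
          simp [colStep, hx, h]
        · have hn : row[j]? = none := by simp; omega
          simp [colStep, dif_neg h, hn]

theorem pvBFold_out (m : Nat) (s : Option Int) (rs : List (List Int)) (p : List Int) (o : List (List Int)) :
    (rs.foldl (pvBStep m s) (p, o)).2 = o ++ (rs.foldl (pvBStep m s) (p, [])).2 := by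
  induction rs generalizing p o with
  | nil => simp
  | cons r rs ih =>
    simp only [List.foldl_cons]
    rw [show pvBStep m s (p, o) r = (pvBRow m s p r, o ++ [pvBRow m s p r]) from rfl,
        show pvBStep m s (p, []) r = (pvBRow m s p r, [] ++ [pvBRow m s p r]) from rfl,
        ih, ih (pvBRow m s p r) ([] ++ [pvBRow m s p r])]
    simp

theorem pvFold_eq (m : Nat) (s : Option Int) (rs : List (List Int))
    (outrows : List (List Int)) (prev : List Int)
    (hlast : outrows.getLast? = some prev) (hprev : prev.length = m)
    (hrs : ∀ r ∈ rs, r.length ≤ m) :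
    rs.foldl (pvAStep m s) outrows = outrows ++ (rs.foldl (pvBStep m s) (prev, [])).2 := by
  induction rs generalizing outrows prev with
  | nil => simp
  | cons r rs ih =>
    have hged : outrows.getLastD [] = prev := by
      cases outrows with
      | nil => simp at hlast
      | cons a l => simp [List.getLastD_eq_getLast?, hlast]
    simp only [List.foldl_cons]
    rw [pvAStep_eq, hged, pvARow_eq_bRow m s prev r hprev (hrs r (by simp)),
        show pvBStep m s (prev, []) r = (pvBRow m s prev r, [] ++ [pvBRow m s prev r]) from rfl]
    rw [ih (outrows ++ [pvBRow m s prev r]) (pvBRow m s prev r)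
          (by simp) (pvBRow_length m s prev r) (fun r hr => hrs r (by simp [hr])),
        pvBFold_out m s rs (pvBRow m s prev r) ([] ++ [pvBRow m s prev r])]
    simp

-- row-major fold equals the pointwise spec (generalized over the starting row)
theorem pvRowMajor_eq_spec (m : Nat) (s : Option Int) (rs : List (List Int)) (prev : List Int)
    (hprev : prev.length = m) :
    (rs.foldl (pvBStep m s) (prev, [])).2 =
      (List.range rs.length).map (fun i =>
        (List.range m).map (fun j => ((rs.take (i + 1)).foldl (colStep s j) (prev.getD j 0)))) := by
  induction rs generalizing prev with
  | nil => simp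
  | cons r rs ih =>
    simp only [List.foldl_cons,
      show pvBStep m s (prev, []) r = (pvBRow m s prev r, [] ++ [pvBRow m s prev r]) from rfl]
    rw [pvBFold_out, ih (pvBRow m s prev r) (pvBRow_length m s prev r)]
    rw [List.length_cons, List.range_succ_eq_map, List.map_cons, List.map_map]
    simp only [List.nil_append, List.singleton_append]
    have htail : (List.range rs.length).map (fun i => (List.range m).map (fun j =>
          ((rs.take (i + 1)).foldl (colStep s j) ((pvBRow m s prev r).getD j 0)))) =
        (List.range rs.length).map ((fun i => (List.range m).map (fun j =>
          (((r :: rs).take (i + 1)).foldl (colStep s j) (prev.getD j 0)))) ∘ Nat.succ) := by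
      apply List.map_congr_left
      intro i _
      apply List.map_congr_left
      intro j hj
      have hjm : j < m := List.mem_range.1 hj
      simp [pvBRow, List.getD_eq_getElem?_getD, hjm]
    rw [htail]
    congr 1

-- the column fold of B, with the accumulator split out
theorem pvColFold_out (s : Option Int) (j : Nat) (rs : List (List Int)) (c : Int) (acc : List Int) :
    (rs.foldl (fun st row =>
        let cur := colStep s j st.1 row
        (cur, st.2 ++ [cur])) (c, acc)).2 =
      acc ++ (rs.foldl (fun st row =>
        let cur := colStep s j st.1 row
        (cur, st.2 ++ [cur])) (c, [])).2 := by
  induction rs generalizing c acc with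
  | nil => simp
  | cons r rs ih =>
    simp only [List.foldl_cons]
    rw [ih, ih (colStep s j c r) ([] ++ [colStep s j c r])]
    simp

theorem pvColFold_eq (s : Option Int) (j : Nat) (rs : List (List Int)) (c : Int) :
    (rs.foldl (fun st row =>
        let cur := colStep s j st.1 row
        (cur, st.2 ++ [cur])) (c, [])).2 =
      (List.range rs.length).map (fun i => (rs.take (i + 1)).foldl (colStep s j) c) := by
  induction rs generalizing c with
  | nil => simp
  | cons r rs ih =>
    simp only [List.foldl_cons]
    rw [pvColFold_out, ih (colStep s j c r)]
    rw [List.length_cons, List.range_succ_eq_map, List.map_cons, List.map_map]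
    simp [Function.comp]

theorem pvCol_spec (s : Option Int) (rs : List (List Int)) (j : Nat) :
    pvCol s rs j = (List.range rs.length).map (fun i => pvCell s rs j i) := by
  unfold pvCol pvCell
  exact pvColFold_eq s j rs 0

theorem pvAlt_eq_spec (rows : List (List Int)) (s : Option Int) :
    carryColumns_alt rows s = pvSpecOut s rows ((rows.map List.length).foldl Nat.max 0) := by
  unfold carryColumns_alt pvSpecOut
  apply List.map_congr_left
  intro i hi
  have hi' : i < rows.length := List.mem_range.1 hi
  rw [List.map_map]
  apply List.map_congr_left
  intro j _
  simp only [Function.comp, pvCol_spec]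
  rw [pv_getD_map_range rows.length i _ hi']

theorem pv_getD_replicate (m j : Nat) (hj : j < m) : ((List.replicate m (0 : Int)).getD j 0) = 0 := by
  simp [List.getD_eq_getElem?_getD, hj]

theorem carryColumns_spec : Claim_equal_carryColumns := by
  intro rows sentinel _ _
  show (List.foldl (pvAStep ((rows.map List.length).foldl Nat.max 0) sentinel)
        [List.replicate ((rows.map List.length).foldl Nat.max 0) 0] rows).drop 1 =
      carryColumns_alt rows sentinel
  set m := (rows.map List.length).foldl Nat.max 0 with hm
  have hrs : ∀ r ∈ rows, r.length ≤ m := fun r hr =>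
    pv_mem_le_foldl_max _ 0 _ (List.mem_map_of_mem hr)
  rw [pvFold_eq m sentinel rows [List.replicate m 0] (List.replicate m 0)
        (by simp) (by simp) hrs]
  rw [pvRowMajor_eq_spec m sentinel rows (List.replicate m 0) (by simp)]
  rw [pvAlt_eq_spec rows sentinel, ← hm]
  unfold pvSpecOut pvCell
  simp only [List.singleton_append, List.drop_succ_cons, List.drop_zero]
  apply List.map_congr_left
  intro i _
  apply List.map_congr_left
  intro j hj
  rw [pv_getD_replicate m j (List.mem_range.1 hj)]
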